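-- pv_equiv track=rewrite | github.com/Brandt3/Programming-Competition | Alien_Math.py | base30_add
-- ===== SOURCE A (Python) =====
-- def base30_add(num1, num2):
--     # Create mapping: 0-9, A-T (base-30)
--     digits = '0123456789ABCDEFGHIJKLMNOPQRST'
--     # These will be used for the conversion
--     # i is the index of each digit or character
--     char_to_val = {ch: i for i, ch in enumerate(digits)}
--     val_to_char = {i: ch for i, ch in enumerate(digits)}
--
--     # Pad the shorter number with leading zeros
--     max_len = max(len(num1), len(num2))
--     num1 = num1.rjust(max_len, '0')
--     num2 = num2.rjust(max_len, '0')
--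
--     carry = 0
--     result = []
--
--     # Add digits from right to left
--     # Counting down from 30, 29, ... 0 inlcuding zero
--     for i in range(max_len - 1, -1, -1):
--         val1 = char_to_val[num1[i]]
--         val2 = char_to_val[num2[i]]
--         total = val1 + val2 + carry
--         # carry the one so it will be added to the  next digit
--         carry = total // 30
--         result.append(val_to_char[total % 30])
--
--         # So if total = 47, 47 % 30 = 17, and val_to_char[17] = 'H' → we add 'H' to the result.
--
--     if carry > 0:
--         result.append(val_to_char[carry])
--
--     # Reverse result since we built it backwards
--     return ''.join(reversed(result))
-- ===== SOURCE B (Python) =====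
-- def base30_add(num1, num2):
--     digits = '0123456789ABCDEFGHIJKLMNOPQRST'
--     char_to_val = {ch: i for i, ch in enumerate(digits)}
--
--     def to_int(s):
--         v = 0
--         for ch in s:
--             v = v * 30 + char_to_val[ch]
--         return v
--
--     total = to_int(num1) + to_int(num2)
--     out = []
--     while total > 0:
--         total, r = divmod(total, 30)
--         out.append(digits[r])
--     return ''.join(reversed(out)).rjust(max(len(num1), len(num2)), '0')
-- ===== Notes on version B (the rewrite author's own statement) =====
-- stated objective: alternative
-- what changed: Replaces A's pad-then-columnwise carry loop by converting each string to an integer (value = value*30 + digit), adding the two integers, and writing the sum back in base 30 via repeated divmod, re-padded with rjust to the input width.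
import Mathlib
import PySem

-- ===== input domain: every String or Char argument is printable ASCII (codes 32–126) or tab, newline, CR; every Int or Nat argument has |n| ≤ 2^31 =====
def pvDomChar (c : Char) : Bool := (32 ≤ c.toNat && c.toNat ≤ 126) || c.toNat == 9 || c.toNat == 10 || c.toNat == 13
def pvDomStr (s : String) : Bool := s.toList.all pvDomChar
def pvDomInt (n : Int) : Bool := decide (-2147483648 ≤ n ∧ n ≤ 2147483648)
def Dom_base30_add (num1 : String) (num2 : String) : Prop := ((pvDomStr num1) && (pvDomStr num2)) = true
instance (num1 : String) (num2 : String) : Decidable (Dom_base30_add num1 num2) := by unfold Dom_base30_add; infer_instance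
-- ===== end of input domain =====

-- B replaces A's digit-by-digit carry loop by: convert both strings to a number,
-- add, write the sum back in base 30, re-pad to the input width (objective: alternative).

-- ===== PORT A =====
-- the base-30 digit alphabet
def pvDigits : List Char :=
  ['0','1','2','3','4','5','6','7','8','9','A','B','C','D','E','F','G','H','I','J',
   'K','L','M','N','O','P','Q','R','S','T']
-- char_to_val[c]: the dict maps each digit char to its index in `digits`; a lookup of a
-- char not in `digits` is a KeyError (excluded by Pre_), here it returns 30 (= length).
def pvC2V (c : Char) : Nat := pvDigits.idxOf c
-- val_to_char[k]: the dict maps index k (always 0..29 where used) to its char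
def pvV2C (k : Nat) : Char := pvDigits.getD k '0'

-- the for-loop over i = max_len-1 .. 0 : recursion over the two REVERSED padded lists;
-- `result` is built least-significant-first, the final carry appended after the loop
def pvLoopA : List Char → List Char → Nat → List Char
  | x :: xs, y :: ys, carry =>
      let total := pvC2V x + pvC2V y + carry
      pvV2C (total % 30) :: pvLoopA xs ys (total / 30)
  | _, _, carry => if carry > 0 then [pvV2C carry] else []

def base30_add (num1 : String) (num2 : String) : String :=
  let n1 := num1.toList
  let n2 := num2.toList
  let maxLen := max n1.length n2.length
  -- num.rjust(max_len, '0'), exact: pads with leading '0' only if shorter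
  let p1 := List.replicate (maxLen - n1.length) '0' ++ n1
  let p2 := List.replicate (maxLen - n2.length) '0' ++ n2
  String.ofList (pvLoopA p1.reverse p2.reverse 0).reverse

-- ===== PORT B =====
-- v = v*30 + char_to_val[ch] over the string, left to right (empty string -> 0)
def pvToInt (s : List Char) : Nat := s.foldl (fun v c => v * 30 + pvC2V c) 0

-- while total > 0: total, r = divmod(total, 30); out.append(digits[r])
def pvToDigitsLSF : Nat → List Char
  | 0 => []
  | n + 1 => pvV2C ((n + 1) % 30) :: pvToDigitsLSF ((n + 1) / 30)
  decreasing_by exact Nat.div_lt_self (Nat.succ_pos n) (by norm_num)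

def base30_add_alt (num1 : String) (num2 : String) : String :=
  let total := pvToInt num1.toList + pvToInt num2.toList
  let out := pvToDigitsLSF total
  let w := max num1.toList.length num2.toList.length
  -- ''.join(reversed(out)).rjust(w, '0')
  String.ofList (List.replicate (w - out.length) '0' ++ out.reverse)

-- ===== PRECONDITION & SPEC =====
-- Pre_ excludes exactly the inputs where A raises KeyError: a character of either
-- string that is not one of the 30 digit chars '0'..'9','A'..'T'.
def Pre_base30_add (num1 : String) (num2 : String) : Prop :=
  (num1.toList.all (fun c => pvDigits.contains c)
    && num2.toList.all (fun c => pvDigits.contains c)) = true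
instance (num1 : String) (num2 : String) : Decidable (Pre_base30_add num1 num2) := by
  unfold Pre_base30_add; infer_instance
def pvWitness_base30_add : String × String := ("1A", "T")

def Spec_base30_add (num1 : String) (num2 : String) (out : String) : Prop := out = base30_add_alt num1 num2
instance (num1 : String) (num2 : String) (out : String) : Decidable (Spec_base30_add num1 num2 out) := by unfold Spec_base30_add; infer_instance

-- ===== CLAIM (what is proved, stated in full; the proofs are below) =====
def Claim_equal_base30_add : Prop := ∀ (num1 : String) (num2 : String), Dom_base30_add num1 num2 → Pre_base30_add num1 num2 → Spec_base30_add num1 num2 (base30_add num1 num2)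

-- ===== LEMMAS AND PROOFS =====

-- value of a least-significant-first digit-char list
def pvValL : List Char → Nat
  | [] => 0
  | c :: l => pvC2V c + 30 * pvValL l

-- the n least-significant base-30 digits of s
def pvDigitsN : Nat → Nat → List Nat
  | 0, _ => []
  | n + 1, s => s % 30 :: pvDigitsN n (s / 30)

-- the minimal (no leading zero) base-30 digit list of s, least-significant-first
def pvMinD : Nat → List Nat
  | 0 => []
  | n + 1 => (n + 1) % 30 :: pvMinD ((n + 1) / 30)
  decreasing_by exact Nat.div_lt_self (Nat.succ_pos n) (by norm_num)

theorem pvC2V_lt (c : Char) (h : c ∈ pvDigits) : pvC2V c < 30 := by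
  have := List.idxOf_lt_length_of_mem h
  simpa [pvC2V, pvDigits] using this

theorem pvValL_lt (l : List Char) (h : ∀ c ∈ l, c ∈ pvDigits) :
    pvValL l < 30 ^ l.length := by
  induction l with
  | nil => simp [pvValL]
  | cons c l ih =>
      have hc := pvC2V_lt c (h c (by simp))
      have hl := ih (fun x hx => h x (by simp [hx]))
      simp only [pvValL, List.length_cons, pow_succ]
      omega

theorem pvValL_append_single (l : List Char) (x : Char) :
    pvValL (l ++ [x]) = pvValL l + pvC2V x * 30 ^ l.length := by
  induction l with
  | nil => simp [pvValL]
  | cons c l ih => simp only [List.cons_append, pvValL, ih, List.length_cons, pow_succ]; ring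

theorem pvValL_replicate0 (k : Nat) : pvValL (List.replicate k '0') = 0 := by
  induction k with
  | zero => simp [pvValL]
  | succ k ih =>
      have h0 : pvC2V '0' = 0 := by decide
      simp [List.replicate_succ, pvValL, ih, h0]

theorem pvValL_append_replicate0 (l : List Char) (k : Nat) :
    pvValL (l ++ List.replicate k '0') = pvValL l := by
  induction l with
  | nil => simpa [pvValL] using pvValL_replicate0 k
  | cons c l ih => simp [pvValL, ih]

theorem pvToInt_eq (l : List Char) (a : Nat) :
    l.foldl (fun v c => v * 30 + pvC2V c) a = a * 30 ^ l.length + pvValL l.reverse := by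
  induction l generalizing a with
  | nil => simp [pvValL]
  | cons c l ih =>
      simp only [List.foldl_cons, ih, List.reverse_cons, pvValL_append_single,
        List.length_reverse, List.length_cons, pow_succ]
      ring

theorem pvDigitsN_zero (n : Nat) : pvDigitsN n 0 = List.replicate n 0 := by
  induction n with
  | zero => simp [pvDigitsN]
  | succ n ih => simp [pvDigitsN, ih, List.replicate_succ]

theorem pvDigitsN_succ (n s : Nat) :
    pvDigitsN (n + 1) s = pvDigitsN n s ++ [s / 30 ^ n % 30] := by
  induction n generalizing s with
  | zero => simp [pvDigitsN]
  | succ n ih =>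
      have h2 : s / 30 ^ (n + 1) = s / 30 / 30 ^ n := by
        rw [Nat.div_div_eq_div_mul, ← pow_succ']
      show s % 30 :: pvDigitsN (n + 1) (s / 30)
          = (s % 30 :: pvDigitsN n (s / 30)) ++ [s / 30 ^ (n + 1) % 30]
      rw [ih (s / 30), h2]
      simp

theorem pvMinD_pad (n : Nat) : ∀ s : Nat, s < 30 ^ n →
    pvDigitsN n s = pvMinD s ++ List.replicate (n - (pvMinD s).length) 0 := by
  induction n with
  | zero =>
      intro s hs
      interval_cases s
      simp [pvDigitsN, pvMinD]
  | succ n ih =>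
      intro s hs
      match s with
      | 0 => simp [pvMinD, pvDigitsN_zero]
      | s + 1 =>
          have hdiv : (s + 1) / 30 < 30 ^ n := by
            rw [Nat.div_lt_iff_lt_mul (by norm_num)]
            calc s + 1 < 30 ^ (n + 1) := hs
              _ = 30 ^ n * 30 := by rw [pow_succ]
          rw [pvMinD]
          simp only [pvDigitsN, ih _ hdiv, List.length_cons, List.cons_append,
            List.cons.injEq, true_and]
          have h3 : n + 1 - ((pvMinD ((s + 1) / 30)).length + 1)
              = n - (pvMinD ((s + 1) / 30)).length := by omega
          rw [h3]

theorem pvMinD_lt (s : Nat) : s < 30 ^ (pvMinD s).length := by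
  induction s using Nat.strong_induction_on with
  | _ s ih =>
      match s with
      | 0 => simp [pvMinD]
      | s + 1 =>
          have hrec := ih ((s + 1) / 30) (Nat.div_lt_self (Nat.succ_pos s) (by norm_num))
          rw [pvMinD]
          simp only [List.length_cons, pow_succ]
          have h30 : (s + 1) / 30 * 30 + 30 > s + 1 := by omega
          calc s + 1 < ((s + 1) / 30 + 1) * 30 := by omega
            _ ≤ 30 ^ (pvMinD ((s + 1) / 30)).length * 30 := by
                have : (s + 1) / 30 + 1 ≤ 30 ^ (pvMinD ((s + 1) / 30)).length := hrec
                exact Nat.mul_le_mul_right 30 this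

theorem pvToDigitsLSF_eq (s : Nat) : pvToDigitsLSF s = (pvMinD s).map pvV2C := by
  induction s using Nat.strong_induction_on with
  | _ s ih =>
      match s with
      | 0 => simp [pvToDigitsLSF, pvMinD]
      | s + 1 =>
          rw [pvToDigitsLSF, pvMinD,
            ih ((s + 1) / 30) (Nat.div_lt_self (Nat.succ_pos s) (by norm_num))]
          simp

-- A's loop computes the n low digits of the column sum plus the overall carry
theorem pvLoopA_eq (xs : List Char) : ∀ (ys : List Char) (c : Nat),
    xs.length = ys.length → (∀ z ∈ xs, z ∈ pvDigits) → (∀ z ∈ ys, z ∈ pvDigits) → c ≤ 1 →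
    pvLoopA xs ys c =
      (pvDigitsN xs.length (pvValL xs + pvValL ys + c)).map pvV2C ++
        (if (pvValL xs + pvValL ys + c) / 30 ^ xs.length > 0
          then [pvV2C ((pvValL xs + pvValL ys + c) / 30 ^ xs.length)] else []) := by
  induction xs with
  | nil =>
      intro ys c hlen _ _ _
      have : ys = [] := List.eq_nil_of_length_eq_zero hlen.symm
      subst this
      simp [pvLoopA, pvValL, pvDigitsN]
  | cons x xs ih =>
      intro ys c hlen hx hy hc
      match ys with
      | [] => simp at hlen
      | y :: ys =>
          have hvx := pvC2V_lt x (hx x (by simp))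
          have hvy := pvC2V_lt y (hy y (by simp))
          have hlen' : xs.length = ys.length := by simpa using hlen
          set t := pvC2V x + pvC2V y + c with ht
          have hc' : t / 30 ≤ 1 := by omega
          have hrec := ih ys (t / 30) hlen' (fun z hz => hx z (by simp [hz]))
            (fun z hz => hy z (by simp [hz])) hc'
          have hS : pvValL (x :: xs) + pvValL (y :: ys) + c
              = t + 30 * (pvValL xs + pvValL ys) := by simp [pvValL, ht]; ring
          set S := pvValL (x :: xs) + pvValL (y :: ys) + c with hSdef
          have hmod : S % 30 = t % 30 := by omega
          have hdiv : S / 30 = pvValL xs + pvValL ys + t / 30 := by omega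
          have hpow : S / 30 ^ (xs.length + 1) = (pvValL xs + pvValL ys + t / 30) / 30 ^ xs.length := by
            rw [pow_succ', ← Nat.div_div_eq_div_mul, hdiv]
          show pvV2C (t % 30) :: pvLoopA xs ys (t / 30) = _
          rw [hrec, List.length_cons, pvDigitsN, hmod, hdiv, hpow]
          simp

-- value of the reversed padded list = value of the reversed original list = pvToInt
theorem pvVal_pad (l : List Char) (k : Nat) :
    pvValL ((List.replicate k '0' ++ l).reverse) = pvToInt l := by
  rw [List.reverse_append, List.reverse_replicate, pvValL_append_replicate0,
    pvToInt, pvToInt_eq]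
  simp

theorem pvMinD_length_le (k : Nat) : ∀ s : Nat, s < 30 ^ k → (pvMinD s).length ≤ k := by
  induction k with
  | zero =>
      intro s hs
      interval_cases s
      simp [pvMinD]
  | succ k ih =>
      intro s hs
      match s with
      | 0 => simp [pvMinD]
      | s + 1 =>
          have hdiv : (s + 1) / 30 < 30 ^ k := by
            rw [Nat.div_lt_iff_lt_mul (by norm_num)]
            calc s + 1 < 30 ^ (k + 1) := hs
              _ = 30 ^ k * 30 := by rw [pow_succ]
          rw [pvMinD]
          simpa using ih _ hdiv

-- the whole computation, over plain equal-length digit lists (least-significant-first)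
theorem pvMain_list (n : Nat) (xs ys : List Char) (hx : xs.length = n) (hy : ys.length = n)
    (hmx : ∀ z ∈ xs, z ∈ pvDigits) (hmy : ∀ z ∈ ys, z ∈ pvDigits) :
    (pvLoopA xs ys 0).reverse
      = List.replicate (n - (pvMinD (pvValL xs + pvValL ys)).length) '0'
          ++ ((pvMinD (pvValL xs + pvValL ys)).map pvV2C).reverse := by
  have hloop := pvLoopA_eq xs ys 0 (by omega) hmx hmy (by norm_num)
  simp only [Nat.add_zero] at hloop
  rw [hx] at hloop
  set S := pvValL xs + pvValL ys with hS
  have h30 : (0:ℕ) < 30 ^ n := pow_pos (by norm_num) n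
  have hSx : pvValL xs < 30 ^ n := hx ▸ pvValL_lt xs hmx
  have hSy : pvValL ys < 30 ^ n := hy ▸ pvValL_lt ys hmy
  have hcarry : S / 30 ^ n ≤ 1 := by
    have h2 : S < 2 * 30 ^ n := by omega
    have := (Nat.div_lt_iff_lt_mul h30).mpr h2
    omega
  have h00 : pvV2C 0 = '0' := by decide
  rcases Nat.le_one_iff_eq_zero_or_eq_one.mp hcarry with h0 | hone
  · -- no final carry: S < 30^n, A's n digits = B's minimal digits zero-padded to n
    have hSlt : S < 30 ^ n := by
      rcases Nat.lt_or_ge S (30 ^ n) with h | h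
      · exact h
      · exact absurd ((Nat.one_le_div_iff h30).mpr h) (by omega)
    rw [hloop, h0]
    simp only [gt_iff_lt, lt_irrefl, if_false, List.append_nil]
    rw [pvMinD_pad n S hSlt]
    simp [List.map_append, List.map_replicate, h00, List.reverse_append]
  · -- final carry 1: 30^n ≤ S < 30^(n+1), B's minimal digits have exactly n+1 digits
    have hge : 30 ^ n ≤ S := (Nat.one_le_div_iff h30).mp (by omega)
    have hSlt : S < 30 ^ (n + 1) := by
      rw [pow_succ]
      omega
    have hmeq : (pvMinD S).length = n + 1 := by
      refine le_antisymm (pvMinD_length_le (n + 1) S hSlt) ?_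
      by_contra h
      have h1 : 30 ^ (pvMinD S).length ≤ 30 ^ n := Nat.pow_le_pow_right (by norm_num) (by omega)
      have h2 := pvMinD_lt S
      omega
    have hfull : pvDigitsN (n + 1) S = pvMinD S := by
      have := pvMinD_pad (n + 1) S hSlt
      rwa [hmeq, Nat.sub_self, List.replicate_zero, List.append_nil] at this
    have hsplit : pvDigitsN n S ++ [1] = pvMinD S := by
      rw [← hfull, pvDigitsN_succ, hone]
    rw [hloop, hone]
    simp only [gt_iff_lt, Nat.zero_lt_one, if_true]
    have hz : n - (n + 1) = 0 := by omega
    rw [hmeq, hz, ← hsplit]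
    simp [List.map_append]

theorem base30_main (l1 l2 : List Char)
    (h1 : ∀ c ∈ l1, c ∈ pvDigits) (h2 : ∀ c ∈ l2, c ∈ pvDigits) :
    base30_add (String.ofList l1) (String.ofList l2) = base30_add_alt (String.ofList l1) (String.ofList l2) := by
  unfold base30_add base30_add_alt
  simp only [String.toList_ofList]
  refine congrArg String.ofList ?_
  set n := max l1.length l2.length with hn
  have hp1len : (List.replicate (n - l1.length) '0' ++ l1).reverse.length = n := by
    simp; omega
  have hp2len : (List.replicate (n - l2.length) '0' ++ l2).reverse.length = n := by
    simp; omega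
  have hm1 : ∀ z ∈ (List.replicate (n - l1.length) '0' ++ l1).reverse, z ∈ pvDigits := by
    intro z hz
    rcases List.mem_append.mp (List.mem_reverse.mp hz) with h | h
    · rw [List.eq_of_mem_replicate h]; decide
    · exact h1 z h
  have hm2 : ∀ z ∈ (List.replicate (n - l2.length) '0' ++ l2).reverse, z ∈ pvDigits := by
    intro z hz
    rcases List.mem_append.mp (List.mem_reverse.mp hz) with h | h
    · rw [List.eq_of_mem_replicate h]; decide
    · exact h2 z h
  have hmain := pvMain_list n _ _ hp1len hp2len hm1 hm2
  rw [pvVal_pad, pvVal_pad] at hmain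
  rw [hmain, pvToDigitsLSF_eq, List.length_map]

-- ===== VERDICT (by name: the statement is the Claim_ definition above) =====
theorem base30_add_spec : Claim_equal_base30_add := by
  intro num1 num2 _ hpre
  unfold Spec_base30_add
  unfold Pre_base30_add at hpre
  rw [Bool.and_eq_true] at hpre
  have h1 : ∀ c ∈ num1.toList, c ∈ pvDigits := by
    intro c hc
    have := List.all_eq_true.mp hpre.1 c hc
    simpa using this
  have h2 : ∀ c ∈ num2.toList, c ∈ pvDigits := by
    intro c hc
    have := List.all_eq_true.mp hpre.2 c hc
    simpa using this
  have e1 : num1 = String.ofList num1.toList := String.ofList_toList.symm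
  have e2 : num2 = String.ofList num2.toList := String.ofList_toList.symm
  rw [e1, e2]
  exact base30_main num1.toList num2.toList h1 h2
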